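-- pv_equiv track=rewrite | github.com/alexddrexler/adventofcode2024 | solutions/year2024/day08/part1.py | get_valid_antinode_count
-- ===== SOURCE A (Python) =====
-- def get_valid_antinode_count(grid, nodes):
--   antinodes = set()
--   for coords in nodes.values():
--     for coord_a in coords:
--       for coord_b in coords:
--         if coord_a == coord_b:
--           continue
--         i_a, j_a = coord_a
--         i_b, j_b = coord_b
--         new_i = i_a + (i_a - i_b)
--         new_j = j_a + (j_a - j_b)
--         if is_valid(grid, new_i, new_j):
--           antinodes.add((new_i, new_j))
--   return len(antinodes)
--
-- def is_valid(grid, i, j):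
--   return all([
--       i >= 0,
--       i < len(grid),
--       j >= 0,
--       j < len(grid[0]),
--   ])
-- ===== SOURCE B (Python) =====
-- def get_valid_antinode_count(grid, nodes):
--   rows = len(grid)
--   cols = len(grid[0]) if grid else 0
--   groups = [(coords, set(coords)) for coords in nodes.values()]
--   count = 0
--   for i in range(rows):
--     for j in range(cols):
--       if any(a != (i, j) and (2 * a[0] - i, 2 * a[1] - j) in s
--              for coords, s in groups for a in coords):
--         count += 1
--   return count
-- ===== Notes on version B (the rewrite author's own statement) =====
-- stated objective: alternative
-- what changed: Instead of enumerating antenna pairs and deduplicating antinodes in a set, B scans every in-bounds grid cell once and counts it if some frequency has an antenna a with a != cell and the mirror point 2a-cell also an antenna of that frequency, so no antinode set and no pair enumeration exist at all.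
-- crash fix: On an empty grid ([]) with some frequency holding two distinct coordinates A raises IndexError at grid[0]; B scans zero cells and returns 0. — e.g. on get_valid_antinode_count([], [("a", [(0, 0), (1, 1)])]): A raises IndexError, B returns 0
import Mathlib
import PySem

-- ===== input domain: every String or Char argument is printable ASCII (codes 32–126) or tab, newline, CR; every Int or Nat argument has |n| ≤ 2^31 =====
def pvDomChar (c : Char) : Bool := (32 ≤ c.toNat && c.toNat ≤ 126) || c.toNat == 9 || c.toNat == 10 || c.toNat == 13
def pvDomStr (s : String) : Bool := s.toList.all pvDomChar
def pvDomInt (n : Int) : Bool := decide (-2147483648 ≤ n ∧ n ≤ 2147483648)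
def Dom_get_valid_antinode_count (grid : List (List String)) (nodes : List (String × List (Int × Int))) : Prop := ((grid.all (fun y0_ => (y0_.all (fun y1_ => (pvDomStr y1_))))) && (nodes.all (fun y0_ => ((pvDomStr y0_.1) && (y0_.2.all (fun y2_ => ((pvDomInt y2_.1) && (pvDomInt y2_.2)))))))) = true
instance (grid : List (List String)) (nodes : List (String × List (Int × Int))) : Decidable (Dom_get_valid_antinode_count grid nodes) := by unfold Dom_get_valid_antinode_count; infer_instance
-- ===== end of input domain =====

-- B replaces A's pair-enumeration-with-dedup-set by a single scan over all grid cells,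
-- counting a cell directly when some frequency has a matching antenna/mirror pair
-- (alternative algorithm, same result; return value only).


-- ===== PORT A =====
-- is_valid(grid, i, j): Python builds the 4-element list and takes all of it.
-- grid[0] is ported via headI; Pre_ excludes the inputs where Python would raise on grid[0].
def pvIsValid (grid : List (List String)) (i j : Int) : Bool :=
  [decide (i ≥ 0), decide (i < (grid.length : Int)),
   decide (j ≥ 0), decide (j < ((grid.headI.length : Nat) : Int))].all id

def get_valid_antinode_count (grid : List (List String)) (nodes : List (String × List (Int × Int))) : Int :=
  ((nodes.foldl (fun ant p =>
      p.2.foldl (fun ant a =>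
        p.2.foldl (fun ant b =>
          if a = b then ant
          else
            let ni := a.1 + (a.1 - b.1)
            let nj := a.2 + (a.2 - b.2)
            if pvIsValid grid ni nj then PySem.Set.add ant (ni, nj) else ant) ant) ant)
    (PySem.Set.empty : PySem.Set (Int × Int))).length : Int)

-- ===== PORT B =====
-- groups = [(coords, set(coords)) for coords in nodes.values()]
def pvGroups (nodes : List (String × List (Int × Int))) : List (List (Int × Int) × PySem.Set (Int × Int)) :=
  nodes.map (fun p => (p.2, PySem.Set.ofList p.2))

-- the 'any(...)' generator over groups and their coords for one cell (i, j)
def pvCellHit (groups : List (List (Int × Int) × PySem.Set (Int × Int))) (i j : Int) : Bool :=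
  groups.any (fun g => g.1.any (fun a =>
    decide (a ≠ (i, j)) && PySem.Set.contains g.2 (2 * a.1 - i, 2 * a.2 - j)))

def get_valid_antinode_count_alt (grid : List (List String)) (nodes : List (String × List (Int × Int))) : Int :=
  let rows : Int := (grid.length : Int)
  let cols : Int := match grid with | [] => 0 | r :: _ => (r.length : Int)
  let groups := pvGroups nodes
  (PySem.List.pyRange 0 rows 1).foldl (fun count i =>
    (PySem.List.pyRange 0 cols 1).foldl (fun count j =>
      if pvCellHit groups i j then count + 1 else count) count) 0

-- ===== PRECONDITION & SPEC =====
-- Pre_ excludes exactly the inputs on which Python A raises IndexError: grid == [] while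
-- some frequency holds two coordinates that differ by value (is_valid then evaluates grid[0]).
def Pre_get_valid_antinode_count (grid : List (List String)) (nodes : List (String × List (Int × Int))) : Prop :=
  grid ≠ [] ∨ ∀ p ∈ nodes, ∀ a ∈ p.2, ∀ b ∈ p.2, a = b
instance (grid : List (List String)) (nodes : List (String × List (Int × Int))) : Decidable (Pre_get_valid_antinode_count grid nodes) := by unfold Pre_get_valid_antinode_count; infer_instance

def pvWitness_get_valid_antinode_count : List (List String) × (List (String × List (Int × Int))) :=
  ([["."], ["."]], [("a", [(0, 0), (1, 0)])])

-- On an empty grid with some frequency holding two distinct coordinates A raises IndexError; B returns 0.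
def Raises_get_valid_antinode_count (grid : List (List String)) (nodes : List (String × List (Int × Int))) : Prop :=
  grid = [] ∧ ∃ p ∈ nodes, ∃ a ∈ p.2, ∃ b ∈ p.2, a ≠ b
instance (grid : List (List String)) (nodes : List (String × List (Int × Int))) : Decidable (Raises_get_valid_antinode_count grid nodes) := by unfold Raises_get_valid_antinode_count; infer_instance

def pvRaiseWitness_get_valid_antinode_count : List (List String) × (List (String × List (Int × Int))) :=
  ([], [("a", [(0, 0), (1, 1)])])
def pvRaiseWitnessOut_get_valid_antinode_count : Int := 0

def Spec_get_valid_antinode_count (grid : List (List String)) (nodes : List (String × List (Int × Int))) (out : Int) : Prop := out = get_valid_antinode_count_alt grid nodes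
instance (grid : List (List String)) (nodes : List (String × List (Int × Int))) (out : Int) : Decidable (Spec_get_valid_antinode_count grid nodes out) := by unfold Spec_get_valid_antinode_count; infer_instance

-- ===== CLAIM (what is proved, stated in full; the proofs are below) =====
def Claim_equal_get_valid_antinode_count : Prop := ∀ (grid : List (List String)) (nodes : List (String × List (Int × Int))), Dom_get_valid_antinode_count grid nodes → Pre_get_valid_antinode_count grid nodes → Spec_get_valid_antinode_count grid nodes (get_valid_antinode_count grid nodes)

def Claim_raises_get_valid_antinode_count : Prop := (∀ (grid : List (List String)) (nodes : List (String × List (Int × Int))), Dom_get_valid_antinode_count grid nodes → Raises_get_valid_antinode_count grid nodes → ¬ Pre_get_valid_antinode_count grid nodes) ∧ (Dom_get_valid_antinode_count (pvRaiseWitness_get_valid_antinode_count.1) (pvRaiseWitness_get_valid_antinode_count.2) ∧ Raises_get_valid_antinode_count (pvRaiseWitness_get_valid_antinode_count.1) (pvRaiseWitness_get_valid_antinode_count.2) ∧ get_valid_antinode_count_alt (pvRaiseWitness_get_valid_antinode_count.1) (pvRaiseWitness_get_valid_antinode_count.2) = pvRaiseWitnessOut_get_valid_antinode_count)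

-- ===== LEMMAS AND PROOFS =====

def antPt (a b : Int × Int) : Int × Int := (a.1 + (a.1 - b.1), a.2 + (a.2 - b.2))

def okA (grid : List (List String)) (a b x : Int × Int) : Prop :=
  a ≠ b ∧ x = antPt a b ∧ pvIsValid grid (antPt a b).1 (antPt a b).2 = true

def pvCols (grid : List (List String)) : Int := match grid with | [] => 0 | r :: _ => (r.length : Int)

-- "cell x is an antinode of some frequency" — the proposition behind B's pvCellHit
def Hit (nodes : List (String × List (Int × Int))) (x : Int × Int) : Prop :=
  ∃ p ∈ nodes, ∃ a ∈ p.2, a ≠ x ∧ (2 * a.1 - x.1, 2 * a.2 - x.2) ∈ p.2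

lemma cellHit_iff (nodes : List (String × List (Int × Int))) (i j : Int) :
    pvCellHit (pvGroups nodes) i j = true ↔ Hit nodes (i, j) := by
  unfold pvCellHit pvGroups Hit
  simp [List.any_eq_true, PySem.Set.contains, PySem.Set.mem_ofList]

lemma valid_iff (grid : List (List String)) (i j : Int) :
    pvIsValid grid i j = true ↔ (0 ≤ i ∧ i < (grid.length : Int) ∧ 0 ≤ j ∧ j < pvCols grid) := by
  cases grid <;> simp [pvIsValid, pvCols, List.all]

-- A's membership predicate equals "in bounds and Hit"
lemma okA_iff_hit (grid : List (List String)) (nodes : List (String × List (Int × Int))) (x : Int × Int) :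
    (∃ p ∈ nodes, ∃ a ∈ p.2, ∃ b ∈ p.2, okA grid a b x)
      ↔ ((0 ≤ x.1 ∧ x.1 < (grid.length : Int) ∧ 0 ≤ x.2 ∧ x.2 < pvCols grid) ∧ Hit nodes x) := by
  constructor
  · rintro ⟨p, hp, a, ha, b, hb, hab, hx, hv⟩
    have hx1 : x.1 = a.1 + (a.1 - b.1) := by rw [hx]; rfl
    have hx2 : x.2 = a.2 + (a.2 - b.2) := by rw [hx]; rfl
    obtain ⟨hv1, hv2, hv3, hv4⟩ := (valid_iff grid _ _).1 hv
    have e1 : (antPt a b).1 = a.1 + (a.1 - b.1) := rfl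
    have e2 : (antPt a b).2 = a.2 + (a.2 - b.2) := rfl
    rw [e1] at hv1 hv2
    rw [e2] at hv3 hv4
    refine ⟨⟨by omega, by omega, by omega, by omega⟩, p, hp, a, ha, ?_, ?_⟩
    · intro h
      have h1 : a.1 = x.1 := congrArg Prod.fst h
      have h2 : a.2 = x.2 := congrArg Prod.snd h
      exact hab (Prod.ext (by omega) (by omega))
    · have e : (2 * a.1 - x.1, 2 * a.2 - x.2) = b :=
        Prod.ext (show 2 * a.1 - x.1 = b.1 by omega) (show 2 * a.2 - x.2 = b.2 by omega)
      rw [e]; exact hb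
  · rintro ⟨⟨hb1, hb2, hb3, hb4⟩, p, hp, a, ha, hax, hb⟩
    refine ⟨p, hp, a, ha, (2 * a.1 - x.1, 2 * a.2 - x.2), hb, ?_, ?_, ?_⟩
    · intro h
      have h1 : a.1 = 2 * a.1 - x.1 := congrArg Prod.fst h
      have h2 : a.2 = 2 * a.2 - x.2 := congrArg Prod.snd h
      exact hax (Prod.ext (by omega) (by omega))
    · exact (Prod.ext (show (antPt a (2 * a.1 - x.1, 2 * a.2 - x.2)).1 = x.1 by
          show a.1 + (a.1 - (2 * a.1 - x.1)) = x.1; omega)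
        (show (antPt a (2 * a.1 - x.1, 2 * a.2 - x.2)).2 = x.2 by
          show a.2 + (a.2 - (2 * a.2 - x.2)) = x.2; omega)).symm
    · have e1 : (antPt a (2 * a.1 - x.1, 2 * a.2 - x.2)).1 = x.1 := by
        show a.1 + (a.1 - (2 * a.1 - x.1)) = x.1; omega
      have e2 : (antPt a (2 * a.1 - x.1, 2 * a.2 - x.2)).2 = x.2 := by
        show a.2 + (a.2 - (2 * a.2 - x.2)) = x.2; omega
      rw [e1, e2]
      exact (valid_iff grid _ _).2 ⟨hb1, hb2, hb3, hb4⟩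

-- A: innermost loop membership
lemma memA_inner (grid : List (List String)) (a : Int × Int) (bs : List (Int × Int)) :
    ∀ (ant : PySem.Set (Int × Int)) (x : Int × Int),
      x ∈ bs.foldl (fun ant b =>
          if a = b then ant
          else
            let ni := a.1 + (a.1 - b.1)
            let nj := a.2 + (a.2 - b.2)
            if pvIsValid grid ni nj then PySem.Set.add ant (ni, nj) else ant) ant
      ↔ x ∈ ant ∨ ∃ b ∈ bs, okA grid a b x := by
  induction bs with
  | nil => intro ant x; simp
  | cons b bs ih =>
    intro ant x
    simp only [List.foldl_cons]
    rw [ih]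
    by_cases hab : a = b
    · subst hab
      simp only [List.mem_cons]
      constructor
      · rintro (h | ⟨b', hb', hok⟩)
        · exact Or.inl h
        · exact Or.inr ⟨b', Or.inr hb', hok⟩
      · rintro (h | ⟨b', hb' | hb', hok⟩)
        · exact Or.inl h
        · subst hb'; exact absurd rfl hok.1
        · exact Or.inr ⟨b', hb', hok⟩
    · simp only [if_neg hab]
      by_cases hv : pvIsValid grid (a.1 + (a.1 - b.1)) (a.2 + (a.2 - b.2)) = true
      · simp only [hv, if_pos]
        constructor
        · rintro (h | ⟨b', hb', hok⟩)
          · rcases (PySem.Set.mem_add _ _ _).1 h with h | h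
            · exact Or.inl h
            · exact Or.inr ⟨b, List.mem_cons_self, hab, h, hv⟩
          · exact Or.inr ⟨b', List.mem_cons_of_mem _ hb', hok⟩
        · rintro (h | ⟨b', hb', hok⟩)
          · exact Or.inl ((PySem.Set.mem_add _ _ _).2 (Or.inl h))
          · rcases List.mem_cons.1 hb' with hb' | hb'
            · subst hb'
              exact Or.inl ((PySem.Set.mem_add _ _ _).2 (Or.inr (by exact hok.2.1)))
            · exact Or.inr ⟨b', hb', hok⟩
      · simp only [if_neg hv]
        constructor
        · rintro (h | ⟨b', hb', hok⟩)
          · exact Or.inl h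
          · exact Or.inr ⟨b', List.mem_cons_of_mem _ hb', hok⟩
        · rintro (h | ⟨b', hb', hok⟩)
          · exact Or.inl h
          · rcases List.mem_cons.1 hb' with hb' | hb'
            · subst hb'; exact absurd hok.2.2 (by simpa [antPt] using hv)
            · exact Or.inr ⟨b', hb', hok⟩

lemma memA_mid (grid : List (List String)) (cs' : List (Int × Int)) (cs : List (Int × Int)) :
    ∀ (ant : PySem.Set (Int × Int)) (x : Int × Int),
      x ∈ cs.foldl (fun ant a =>
          cs'.foldl (fun ant b =>
            if a = b then ant
            else
              let ni := a.1 + (a.1 - b.1)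
              let nj := a.2 + (a.2 - b.2)
              if pvIsValid grid ni nj then PySem.Set.add ant (ni, nj) else ant) ant) ant
      ↔ x ∈ ant ∨ ∃ a ∈ cs, ∃ b ∈ cs', okA grid a b x := by
  induction cs with
  | nil => intro ant x; simp
  | cons a cs ih =>
    intro ant x
    simp only [List.foldl_cons]
    rw [ih, memA_inner]
    simp only [List.mem_cons]
    constructor
    · rintro ((h | ⟨b, hb, hok⟩) | ⟨a', ha', hrest⟩)
      · exact Or.inl h
      · exact Or.inr ⟨a, Or.inl rfl, b, hb, hok⟩
      · exact Or.inr ⟨a', Or.inr ha', hrest⟩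
    · rintro (h | ⟨a', ha' | ha', hrest⟩)
      · exact Or.inl (Or.inl h)
      · subst ha'; exact Or.inl (Or.inr hrest)
      · exact Or.inr ⟨a', ha', hrest⟩

lemma memA_top (grid : List (List String)) (nodes : List (String × List (Int × Int))) :
    ∀ (ant : PySem.Set (Int × Int)) (x : Int × Int),
      x ∈ nodes.foldl (fun ant p =>
          p.2.foldl (fun ant a =>
            p.2.foldl (fun ant b =>
              if a = b then ant
              else
                let ni := a.1 + (a.1 - b.1)
                let nj := a.2 + (a.2 - b.2)
                if pvIsValid grid ni nj then PySem.Set.add ant (ni, nj) else ant) ant) ant) ant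
      ↔ x ∈ ant ∨ ∃ p ∈ nodes, ∃ a ∈ p.2, ∃ b ∈ p.2, okA grid a b x := by
  induction nodes with
  | nil => intro ant x; simp
  | cons p ps ih =>
    intro ant x
    simp only [List.foldl_cons]
    rw [ih, memA_mid]
    simp only [List.mem_cons]
    constructor
    · rintro ((h | ⟨a, ha, b, hb, hok⟩) | ⟨p', hp', hrest⟩)
      · exact Or.inl h
      · exact Or.inr ⟨p, Or.inl rfl, a, ha, b, hb, hok⟩
      · exact Or.inr ⟨p', Or.inr hp', hrest⟩
    · rintro (h | ⟨p', hp' | hp', hrest⟩)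
      · exact Or.inl (Or.inl h)
      · subst hp'; exact Or.inl (Or.inr hrest)
      · exact Or.inr ⟨p', hp', hrest⟩

-- Nodup preservation on A's side
lemma nodupA_inner (grid : List (List String)) (a : Int × Int) (bs : List (Int × Int)) :
    ∀ (ant : PySem.Set (Int × Int)), ant.Nodup →
      (bs.foldl (fun ant b =>
          if a = b then ant
          else
            let ni := a.1 + (a.1 - b.1)
            let nj := a.2 + (a.2 - b.2)
            if pvIsValid grid ni nj then PySem.Set.add ant (ni, nj) else ant) ant).Nodup := by
  induction bs with
  | nil => intro ant h; exact h
  | cons b bs ih =>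
    intro ant h
    simp only [List.foldl_cons]
    apply ih
    dsimp only
    split_ifs with h1 h2
    · exact h
    · exact PySem.Set.nodup_add _ _ h
    · exact h

lemma nodupA_mid (grid : List (List String)) (cs' cs : List (Int × Int)) :
    ∀ (ant : PySem.Set (Int × Int)), ant.Nodup →
      (cs.foldl (fun ant a =>
          cs'.foldl (fun ant b =>
            if a = b then ant
            else
              let ni := a.1 + (a.1 - b.1)
              let nj := a.2 + (a.2 - b.2)
              if pvIsValid grid ni nj then PySem.Set.add ant (ni, nj) else ant) ant) ant).Nodup := by
  induction cs with
  | nil => intro ant h; exact h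
  | cons a cs ih =>
    intro ant h
    simp only [List.foldl_cons]
    exact ih _ (nodupA_inner grid a cs' ant h)

lemma nodupA_top (grid : List (List String)) (nodes : List (String × List (Int × Int))) :
    ∀ (ant : PySem.Set (Int × Int)), ant.Nodup →
      (nodes.foldl (fun ant p =>
          p.2.foldl (fun ant a =>
            p.2.foldl (fun ant b =>
              if a = b then ant
              else
                let ni := a.1 + (a.1 - b.1)
                let nj := a.2 + (a.2 - b.2)
                if pvIsValid grid ni nj then PySem.Set.add ant (ni, nj) else ant) ant) ant) ant).Nodup := by
  induction nodes with
  | nil => intro ant h; exact h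
  | cons p ps ih =>
    intro ant h
    simp only [List.foldl_cons]
    exact ih _ (nodupA_mid grid p.2 p.2 ant h)

-- B's counting fold = countP
lemma foldl_count {α : Type} (p : α → Bool) (l : List α) :
    ∀ c : Int, l.foldl (fun c x => if p x then c + 1 else c) c = c + (l.countP p : Int) := by
  induction l with
  | nil => intro c; simp
  | cons x l ih =>
    intro c
    simp only [List.foldl_cons, List.countP_cons]
    by_cases h : p x = true
    · rw [if_pos h, ih]; simp [h]; ring
    · rw [if_neg h, ih]; simp [h]

-- the cell list B conceptually scans
def cellList (rows cols : Int) : List (Int × Int) :=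
  (PySem.List.pyRange 0 rows 1).flatMap (fun i => (PySem.List.pyRange 0 cols 1).map (fun j => (i, j)))

lemma mem_cellList (rows cols : Int) (x : Int × Int) :
    x ∈ cellList rows cols ↔ 0 ≤ x.1 ∧ x.1 < rows ∧ 0 ≤ x.2 ∧ x.2 < cols := by
  unfold cellList
  simp only [List.mem_flatMap, List.mem_map, PySem.List.mem_pyRange_one]
  constructor
  · rintro ⟨i, hi, j, hj, rfl⟩; exact ⟨hi.1, hi.2, hj.1, hj.2⟩
  · rintro ⟨h1, h2, h3, h4⟩; exact ⟨x.1, ⟨h1, h2⟩, x.2, ⟨h3, h4⟩, rfl⟩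

lemma nodup_cellList (rows cols : Int) : (cellList rows cols).Nodup := by
  unfold cellList
  refine List.nodup_flatMap.2 ⟨?_, ?_⟩
  · intro i _
    exact (PySem.List.nodup_pyRange_one 0 cols).map
      (Function.LeftInverse.injective (g := Prod.snd) fun j => rfl)
  · refine (PySem.List.nodup_pyRange_one 0 rows).imp ?_
    intro i i' hne
    simp only [Function.onFun, List.disjoint_left, List.mem_map]
    rintro x ⟨j, _, rfl⟩ ⟨j', _, he⟩
    exact hne (congrArg Prod.fst he).symm

lemma rowsFold (p : Int → Int → Bool) (cols : Int) (is : List Int) :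
    ∀ c : Int, is.foldl (fun c i =>
        (PySem.List.pyRange 0 cols 1).foldl (fun c j => if p i j then c + 1 else c) c) c
      = c + ((is.flatMap (fun i => (PySem.List.pyRange 0 cols 1).map (fun j => (i, j)))).countP
              (fun x => p x.1 x.2) : Int) := by
  induction is with
  | nil => intro c; simp
  | cons i is ih =>
    intro c
    simp only [List.foldl_cons, List.flatMap_cons, List.countP_append]
    rw [foldl_count, ih]
    rw [List.countP_map]
    have hc : ((fun x : Int × Int => p x.1 x.2) ∘ fun j => (i, j)) = p i := rfl
    rw [hc]
    push_cast
    ring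

lemma alt_eq_countP (grid : List (List String)) (nodes : List (String × List (Int × Int))) :
    get_valid_antinode_count_alt grid nodes
      = ((cellList (grid.length : Int) (pvCols grid)).countP
          (fun x => pvCellHit (pvGroups nodes) x.1 x.2) : Int) := by
  unfold get_valid_antinode_count_alt cellList
  have hcols : (match grid with | [] => (0 : Int) | r :: _ => (r.length : Int)) = pvCols grid := by
    cases grid <;> rfl
  simp only [hcols]
  rw [rowsFold (fun i j => pvCellHit (pvGroups nodes) i j) (pvCols grid)]
  simp

-- ===== VERDICT (by name: the statement is the Claim_ definition above) =====
theorem get_valid_antinode_count_spec : Claim_equal_get_valid_antinode_count := by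
  intro grid nodes _ _
  unfold Spec_get_valid_antinode_count
  rw [alt_eq_countP]
  unfold get_valid_antinode_count
  rw [List.countP_eq_length_filter]
  have hA := nodupA_top grid nodes PySem.Set.empty List.nodup_nil
  have hB := (nodup_cellList (grid.length : Int) (pvCols grid)).filter
    (p := fun x => pvCellHit (pvGroups nodes) x.1 x.2)
  have hmem : ∀ x : Int × Int,
      x ∈ nodes.foldl (fun ant p =>
          p.2.foldl (fun ant a =>
            p.2.foldl (fun ant b =>
              if a = b then ant
              else
                let ni := a.1 + (a.1 - b.1)
                let nj := a.2 + (a.2 - b.2)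
                if pvIsValid grid ni nj then PySem.Set.add ant (ni, nj) else ant) ant) ant)
        (PySem.Set.empty : PySem.Set (Int × Int))
      ↔ x ∈ (cellList (grid.length : Int) (pvCols grid)).filter
            (fun x => pvCellHit (pvGroups nodes) x.1 x.2) := by
    intro x
    rw [memA_top, List.mem_filter, mem_cellList]
    simp only [PySem.Set.empty, List.not_mem_nil, false_or]
    rw [okA_iff_hit]
    have : pvCellHit (pvGroups nodes) x.1 x.2 = true ↔ Hit nodes x := by
      have := cellHit_iff nodes x.1 x.2
      simpa using this
    rw [this]
    try tauto
  have hperm := (List.perm_ext_iff_of_nodup hA hB).mpr hmem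
  exact_mod_cast hperm.length_eq

@[simp]
theorem get_valid_antinode_count_raises : Claim_raises_get_valid_antinode_count := by
  unfold Claim_raises_get_valid_antinode_count
  constructor
  · rintro grid nodes _ ⟨hg, p, hp, a, ha, b, hb, hab⟩ hPre
    rcases hPre with h | h
    · exact h hg
    · exact hab (h p hp a ha b hb)
  · exact ⟨by decide, by decide, by decide⟩
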